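-- pv_equiv track=rewrite | github.com/Natasha-Ivanova/AdventOfCode2025 | day2.py | checkRepeats
-- ===== SOURCE A (Python) =====
-- def checkRepeats(n):
--     string = str(n)
--     if (len(string)) == 1:
--         return False
--     for i in range(2, len(string) // 2 + 1):
--         if len(string) % i == 0:
--             segment = string[0:len(string) // i]
--             if segment * i == string:
--                 return True
--     return string[0] * len(string) == string
-- ===== SOURCE B (Python) =====
-- def checkRepeats(n):
--     s = str(n)
--     return s in (s + s)[1:-1]
-- ===== Notes on version B (the rewrite author's own statement) =====
-- stated objective: idiomatic
-- what changed: Replaces the divisor-enumeration loop (try every segment count i, rebuild the string, plus a separate all-equal-chars fallback) with the standard repeated-substring trick: s is a repetition of a proper prefix iff s occurs in (s+s)[1:-1], one containment test.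
import Mathlib
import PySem

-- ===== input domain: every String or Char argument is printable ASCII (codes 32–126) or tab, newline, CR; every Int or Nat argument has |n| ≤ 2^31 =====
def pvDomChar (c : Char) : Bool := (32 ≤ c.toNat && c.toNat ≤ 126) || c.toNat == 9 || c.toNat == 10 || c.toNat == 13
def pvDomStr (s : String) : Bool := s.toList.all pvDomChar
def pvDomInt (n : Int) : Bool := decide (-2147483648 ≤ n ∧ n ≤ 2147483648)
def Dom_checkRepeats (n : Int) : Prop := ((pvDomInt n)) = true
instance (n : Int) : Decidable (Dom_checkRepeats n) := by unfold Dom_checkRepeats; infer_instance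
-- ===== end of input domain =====

-- B replaces A's divisor-enumeration loop with the standard repeated-substring trick
-- `s in (s+s)[1:-1]` (idiomatic; same return value on every int).

-- ===== PORT A =====
-- Python sequence repetition `w * k` (k ≤ 0 gives the empty sequence) — ported by hand, exact.
def pvStrMul (w : List Char) (k : Int) : List Char := (List.replicate k.toNat w).flatten

-- the for-loop of A, falling through to the final `return string[0] * len(string) == string`;
-- string[0] is total here because str(n) is never empty (pyGetD default is unreachable).
def pvLoopA (s : List Char) : List Int → Bool
  | [] => pvStrMul [PySem.List.pyGetD s 0 ' '] (PySem.List.len s) == s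
  | i :: rest =>
      if PySem.Int.mod (PySem.List.len s) i == 0 then
        if pvStrMul (PySem.List.slice s (some 0)
              (some (PySem.Int.floordiv (PySem.List.len s) i))) i == s then true
        else pvLoopA s rest
      else pvLoopA s rest

def checkRepeats (n : Int) : Bool :=
  let string := PySem.Int.toChars n
  if PySem.List.len string == 1 then false
  else pvLoopA string
    (PySem.List.pyRange 2 (PySem.Int.floordiv (PySem.List.len string) 2 + 1) 1)

-- ===== PORT B =====
def checkRepeats_alt (n : Int) : Bool :=
  let s := PySem.Int.toChars n
  PySem.Chars.isIn s (PySem.List.slice (s ++ s) (some 1) (some (-1)))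

-- ===== PRECONDITION & SPEC =====
def Spec_checkRepeats (n : Int) (out : Bool) : Prop := out = checkRepeats_alt n
instance (n : Int) (out : Bool) : Decidable (Spec_checkRepeats n out) := by unfold Spec_checkRepeats; infer_instance

-- ===== CLAIM (what is proved, stated in full; the proofs are below) =====
def Claim_equal_checkRepeats : Prop := ∀ (n : Int), Dom_checkRepeats n → Spec_checkRepeats n (checkRepeats n)

-- ===== LEMMAS AND PROOFS =====

-- str(n) is never the empty string
lemma toDigitsCore_cons_ne_nil (b : ℕ) : ∀ (f n : ℕ) (c : Char) (ds : List Char),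
    Nat.toDigitsCore b f n (c :: ds) ≠ [] := by
  intro f
  induction f with
  | zero => intro n c ds; simp [Nat.toDigitsCore]
  | succ f ih =>
      intro n c ds
      rw [Nat.toDigitsCore]
      split
      · simp
      · exact ih _ _ _

lemma toChars_ne_nil (n : Int) : PySem.Int.toChars n ≠ [] := by
  unfold PySem.Int.toChars
  split
  · simp
  · rw [Nat.toDigits, Nat.toDigitsCore]
    split
    · simp
    · exact toDigitsCore_cons_ne_nil _ _ _ _ _

-- rotation closure lemmas
lemma rot_mul {α : Type} (l : List α) (k : ℕ) (h : l.rotate k = l) :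
    ∀ m : ℕ, l.rotate (m * k) = l := by
  intro m
  induction m with
  | zero => simp
  | succ m ih => rw [Nat.succ_mul, ← List.rotate_rotate, ih, h]

lemma rot_gcd {α : Type} (l : List α) : ∀ (b a : ℕ),
    l.rotate a = l → l.rotate b = l → l.rotate (Nat.gcd b a) = l := by
  intro b
  induction b using Nat.strong_induction_on with
  | _ b ih =>
    intro a ha hb
    rcases Nat.eq_zero_or_pos b with rfl | hbpos
    · simpa using ha
    · rw [Nat.gcd_rec]
      refine ih (a % b) (Nat.mod_lt _ hbpos) b hb ?_
      have h1 : (l.rotate (a % b)).rotate (b * (a / b)) = l.rotate (b * (a / b)) := by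
        rw [List.rotate_rotate]
        have he : a % b + b * (a / b) = a := by
          have := Nat.mod_add_div a b; omega
        rw [he, ha, mul_comm]
        exact (rot_mul l b hb (a / b)).symm
      exact List.rotate_eq_rotate.mp h1

lemma flatten_replicate_comm {α : Type} (w : List α) (m : ℕ) :
    (List.replicate m w).flatten ++ w = w ++ (List.replicate m w).flatten := by
  induction m with
  | zero => simp
  | succ m ih => simp [List.replicate_succ, List.flatten_cons, List.append_assoc, ih]

lemma rot_of_pow {α : Type} (w : List α) (m : ℕ) (l : List α)
    (hl : l = (List.replicate (m + 1) w).flatten) :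
    l.drop w.length ++ l.take w.length = l := by
  subst hl
  rw [List.replicate_succ, List.flatten_cons]
  rw [List.take_append_of_le_length (by simp), List.drop_append_of_le_length (by simp)]
  simp [flatten_replicate_comm]

lemma pow_of_rot {α : Type} : ∀ (m d : ℕ) (l : List α), 0 < d → l.length = m * d →
    l.drop d ++ l.take d = l → l = (List.replicate m (l.take d)).flatten := by
  intro m
  induction m with
  | zero =>
      intro d l _ hlen _
      have : l = [] := List.eq_nil_of_length_eq_zero (by omega)
      simp [this]
  | succ m ih =>
      intro d l hd hlen hrot
      rcases Nat.eq_zero_or_pos m with rfl | hm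
      · have htake : l.take d = l := List.take_of_length_le (by omega)
        simp [htake]
      · set x := l.take d with hx
        set t := l.drop d with ht
        have hlen' : l.length = m * d + d := by rw [hlen]; ring
        have hdl : d ≤ l.length := by omega
        have hxlen : x.length = d := by simp [hx]; omega
        have htlen : t.length = m * d := by simp [ht]; omega
        have hdt : d ≤ t.length := by
          rw [htlen]; calc d = 1 * d := (one_mul d).symm
          _ ≤ m * d := Nat.mul_le_mul_right d hm
        have hsplit : x ++ t = l := List.take_append_drop d l
        have hcomm : t ++ x = x ++ t := by rw [hsplit]; exact hrot
        have htx : t.take d = x := by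
          have h := congrArg (List.take d) hcomm
          rwa [List.take_append_of_le_length hdt,
               List.take_append_of_le_length (le_of_eq hxlen.symm),
               List.take_of_length_le (le_of_eq hxlen)] at h
        have htrot : t.drop d ++ t.take d = t := by
          have h := congrArg (List.drop d) hcomm
          rw [List.drop_append_of_le_length hdt,
              List.drop_append_of_le_length (le_of_eq hxlen.symm),
              List.drop_of_length_le (le_of_eq hxlen), List.nil_append] at h
          rw [htx]; exact h
        have hrec := ih d t hd htlen htrot
        rw [htx] at hrec
        calc l = x ++ t := hsplit.symm
        _ = x ++ (List.replicate m x).flatten := by rw [← hrec]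
        _ = (List.replicate (m + 1) x).flatten := by simp [List.replicate_succ]

-- characterizations
def hasPow (s : List Char) : Prop :=
  ∃ d : ℕ, d ∣ s.length ∧ 1 ≤ d ∧ d < s.length ∧
    s = (List.replicate (s.length / d) (s.take d)).flatten

def hasRot (s : List Char) : Prop :=
  ∃ k : ℕ, 1 ≤ k ∧ k < s.length ∧ s.rotate k = s

lemma hasRot_iff_hasPow (s : List Char) : hasRot s ↔ hasPow s := by
  constructor
  · rintro ⟨k, hk1, hkL, hrot⟩
    refine ⟨Nat.gcd k s.length, Nat.gcd_dvd_right _ _, Nat.gcd_pos_of_pos_left _ (by omega),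
      lt_of_le_of_lt (Nat.gcd_le_left _ (by omega)) hkL, ?_⟩
    have hg : s.rotate (Nat.gcd k s.length) = s :=
      rot_gcd s k s.length (List.rotate_length s) hrot
    have hgle : Nat.gcd k s.length ≤ s.length :=
      le_of_lt (lt_of_le_of_lt (Nat.gcd_le_left _ (by omega)) hkL)
    have hdt : s.drop (Nat.gcd k s.length) ++ s.take (Nat.gcd k s.length) = s := by
      rw [← List.rotate_eq_drop_append_take hgle]; exact hg
    exact pow_of_rot _ _ s (Nat.gcd_pos_of_pos_left _ (by omega))
      (Nat.div_mul_cancel (Nat.gcd_dvd_right _ _)).symm hdt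
  · rintro ⟨d, hdvd, hd1, hdL, hpow⟩
    refine ⟨d, hd1, hdL, ?_⟩
    have hm : s.length / d = (s.length / d - 1) + 1 := by
      have h0 : 0 < s.length / d := Nat.div_pos (le_of_lt hdL) (by omega)
      omega
    have hw : (s.take d).length = d := by
      rw [List.length_take]; omega
    have hrot := rot_of_pow (s.take d) (s.length / d - 1) s (by rw [← hm]; exact hpow)
    rw [hw] at hrot
    rw [List.rotate_eq_drop_append_take (le_of_lt hdL)]
    exact hrot

lemma B_char (s : List Char) (hne : s ≠ []) :
    PySem.Chars.isIn s (PySem.List.slice (s ++ s) (some 1) (some (-1))) = true ↔ hasRot s := by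
  have hL : 1 ≤ s.length := by
    cases s with
    | nil => exact absurd rfl hne
    | cons a l => simp
  have hmid : PySem.List.slice (s ++ s) (some 1) (some (-1)) =
      ((s ++ s).drop 1).take (s.length + s.length - 2) := by
    simp only [PySem.List.slice, PySem.List.clampIdx, List.length_append]
    norm_num
    rw [if_neg (by omega), min_eq_left (by omega), List.drop_one]
    congr 1
    omega
  rw [hmid, ← PySem.Chars.exists_prefix_drop_iff_isIn]
  constructor
  · rintro ⟨j, hj⟩
    rw [List.drop_take, List.drop_drop] at hj
    rw [List.prefix_take_iff] at hj
    obtain ⟨hpre, hlen⟩ := hj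
    rw [Nat.add_comm 1 j] at hpre
    refine ⟨j + 1, by omega, by omega, ?_⟩
    have hk : j + 1 ≤ s.length := by omega
    rw [List.drop_append_of_le_length hk] at hpre
    rw [List.prefix_iff_eq_take] at hpre
    rw [List.rotate_eq_drop_append_take hk]
    have hlen' : (s.drop (j + 1)).length = s.length - (j + 1) := by simp
    have : List.take s.length (s.drop (j + 1) ++ s) =
        s.drop (j + 1) ++ s.take (j + 1) := by
      rw [List.take_append, List.take_of_length_le (by simp), List.length_drop,
        Nat.sub_sub_self hk]
    rw [this] at hpre
    exact hpre.symm
  · rintro ⟨k, hk1, hkL, hrot⟩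
    refine ⟨k - 1, ?_⟩
    rw [List.drop_take, List.drop_drop]
    rw [List.prefix_take_iff]
    have hke : 1 + (k - 1) = k := by omega
    rw [hke]
    constructor
    · rw [List.drop_append_of_le_length (by omega)]
      rw [List.prefix_iff_eq_take]
      have hlen' : (s.drop k).length = s.length - k := by simp
      have ht : List.take s.length (s.drop k ++ s) = s.drop k ++ s.take k := by
        rw [List.take_append, List.take_of_length_le (by simp), List.length_drop,
          Nat.sub_sub_self (le_of_lt hkL)]
      rw [ht, ← List.rotate_eq_drop_append_take (by omega), hrot]
    · omega

lemma loop_any (s : List Char) : ∀ is : List Int, pvLoopA s is =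
    ((is.any fun i => (PySem.Int.mod (PySem.List.len s) i == 0) &&
        (pvStrMul (PySem.List.slice s (some 0)
          (some (PySem.Int.floordiv (PySem.List.len s) i))) i == s))
      || (pvStrMul [PySem.List.pyGetD s 0 ' '] (PySem.List.len s) == s)) := by
  intro is
  induction is with
  | nil => simp [pvLoopA]
  | cons i rest ih =>
      rw [pvLoopA, List.any_cons, ih]
      cases h1 : (PySem.Int.mod (PySem.List.len s) i == 0) <;>
        cases h2 : (pvStrMul (PySem.List.slice s (some 0)
          (some (PySem.Int.floordiv (PySem.List.len s) i))) i == s) <;>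
        simp_all

lemma flatten_replicate_singleton {α : Type} (m : ℕ) (a : α) :
    (List.replicate m [a]).flatten = List.replicate m a := by
  induction m with
  | zero => simp
  | succ m ih => simp [List.replicate_succ, ih]

lemma len_natCast (s : List Char) : PySem.List.len s = (s.length : Int) := PySem.List.len_eq s

lemma A_char (s : List Char) (h2 : 2 ≤ s.length) :
    pvLoopA s (PySem.List.pyRange 2 (PySem.Int.floordiv (PySem.List.len s) 2 + 1) 1) = true
      ↔ hasPow s := by
  obtain ⟨c, cs, rfl⟩ := List.exists_cons_of_ne_nil (l := s) (by intro h; rw [h] at h2; simp at h2)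
  set s := c :: cs with hs
  have hLpos : 0 < s.length := by rw [hs]; simp
  have hdiv2 : PySem.Int.floordiv (PySem.List.len s) 2 = ((s.length / 2 : ℕ) : Int) := by
    rw [len_natCast, show ((2:Int)) = ((2:ℕ):Int) by norm_num, PySem.Int.floordiv_natCast]
  rw [loop_any, Bool.or_eq_true, List.any_eq_true]
  constructor
  · rintro (⟨i, hmem, hcond⟩ | hfinal)
    · rw [PySem.List.mem_pyRange_one, hdiv2] at hmem
      rw [Bool.and_eq_true, beq_iff_eq, beq_iff_eq] at hcond
      obtain ⟨hmod, hmul⟩ := hcond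
      obtain ⟨I, rfl⟩ : ∃ I : ℕ, i = (I : Int) := ⟨i.toNat, by omega⟩
      have hI2 : 2 ≤ I := by exact_mod_cast hmem.1
      have hIle : I ≤ s.length / 2 := by
        have := hmem.2; omega
      rw [len_natCast, PySem.Int.mod_eq_zero_iff_dvd] at hmod
      have hIdvd : I ∣ s.length := by exact_mod_cast hmod
      have hfd : PySem.Int.floordiv (PySem.List.len s) (I : Int)
          = ((s.length / I : ℕ) : Int) := by
        rw [len_natCast, PySem.Int.floordiv_natCast]
      rw [hfd, PySem.List.slice_zero_start, PySem.List.slice_to_natCast] at hmul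
      unfold pvStrMul at hmul
      rw [Int.toNat_natCast] at hmul
      refine ⟨s.length / I, Nat.div_dvd_of_dvd hIdvd, ?_, ?_, ?_⟩
      · exact Nat.div_pos (by omega) (by omega)
      · calc s.length / I ≤ s.length / 2 := Nat.div_le_div_left hI2 (by omega)
        _ < s.length := Nat.div_lt_self hLpos (by omega)
      · rw [Nat.div_div_self hIdvd (by omega)]
        exact hmul.symm
    · rw [beq_iff_eq] at hfinal
      unfold pvStrMul at hfinal
      rw [len_natCast, Int.toNat_natCast] at hfinal
      rw [flatten_replicate_singleton] at hfinal
      refine ⟨1, Nat.one_dvd _, le_refl 1, by omega, ?_⟩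
      rw [Nat.div_one]
      have htake : s.take 1 = [PySem.List.pyGetD s 0 ' '] := by
        rw [hs]; simp [PySem.List.pyGetD_zero_cons]
      rw [htake, flatten_replicate_singleton]
      exact hfinal.symm
  · rintro ⟨d, hdvd, hd1, hdL, hpow⟩
    have hmd : s.length / d * d = s.length := Nat.div_mul_cancel hdvd
    have hm2 : 2 ≤ s.length / d := by
      rcases Nat.lt_or_ge (s.length / d) 2 with h | h
      · interval_cases h' : (s.length / d) <;> omega
      · exact h
    by_cases hdeq : d = 1
    · right
      subst hdeq
      rw [Nat.div_one] at hpow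
      have htake : s.take 1 = [PySem.List.pyGetD s 0 ' '] := by
        rw [hs]; simp [PySem.List.pyGetD_zero_cons]
      rw [htake] at hpow
      rw [beq_iff_eq]
      unfold pvStrMul
      rw [len_natCast, Int.toNat_natCast]
      exact hpow.symm
    · left
      refine ⟨((s.length / d : ℕ) : Int), ?_, ?_⟩
      · rw [PySem.List.mem_pyRange_one, hdiv2]
        constructor
        · exact_mod_cast hm2
        · have : s.length / d ≤ s.length / 2 := by
            rw [Nat.le_div_iff_mul_le (by omega)]
            calc s.length / d * 2 ≤ s.length / d * d := by
                  apply Nat.mul_le_mul_left; omega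
            _ = s.length := hmd
          exact_mod_cast (by omega : ((s.length / d : ℕ) : Int) < ((s.length / 2 : ℕ) : Int) + 1)
      · rw [Bool.and_eq_true, beq_iff_eq, beq_iff_eq]
        constructor
        · rw [len_natCast, PySem.Int.mod_eq_zero_iff_dvd]
          exact_mod_cast Nat.div_dvd_of_dvd hdvd
        · have hfd : PySem.Int.floordiv (PySem.List.len s) ((s.length / d : ℕ) : Int)
              = ((s.length / (s.length / d) : ℕ) : Int) := by
            rw [len_natCast, PySem.Int.floordiv_natCast]
          rw [hfd, Nat.div_div_self hdvd (by omega),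
            PySem.List.slice_zero_start, PySem.List.slice_to_natCast]
          unfold pvStrMul
          rw [Int.toNat_natCast]
          exact hpow.symm

lemma main_list (s : List Char) (hne : s ≠ []) :
    (if PySem.List.len s == 1 then false
     else pvLoopA s (PySem.List.pyRange 2 (PySem.Int.floordiv (PySem.List.len s) 2 + 1) 1))
    = PySem.Chars.isIn s (PySem.List.slice (s ++ s) (some 1) (some (-1))) := by
  have hL : 1 ≤ s.length := by
    cases s with
    | nil => exact absurd rfl hne
    | cons a l => simp
  by_cases hL1 : s.length = 1
  · have hnorot : ¬ hasRot s := by rintro ⟨k, h1, h2, _⟩; omega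
    have hBf : PySem.Chars.isIn s (PySem.List.slice (s ++ s) (some 1) (some (-1))) = false := by
      cases hiso : PySem.Chars.isIn s (PySem.List.slice (s ++ s) (some 1) (some (-1))) with
      | false => rfl
      | true => exact absurd ((B_char s hne).mp hiso) hnorot
    rw [hBf, if_pos]
    rw [len_natCast, hL1]
    rfl
  · have h2 : 2 ≤ s.length := by omega
    rw [if_neg (by rw [len_natCast]; simp; omega)]
    rw [Bool.eq_iff_iff, A_char s h2, B_char s hne, hasRot_iff_hasPow s]

-- ===== VERDICT (by name: the statement is the Claim_ definition above) =====
theorem checkRepeats_spec : Claim_equal_checkRepeats := by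
  intro n _
  unfold Spec_checkRepeats checkRepeats checkRepeats_alt
  exact main_list _ (toChars_ne_nil n)
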